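-- pv_equiv track=rewrite | github.com/qozp/anagram-duels | AnagramDuels/Scripts/seed_daily_challenges.py | compute_max_score
-- ===== SOURCE A (Python) =====
-- WORD_SCORES: dict[int, int] = {
--     2: 100,
--     3: 300,
--     4: 600,
--     5: 1000,
--     6: 1500,
-- }
--
-- MIN_WORD_LENGTH = 2
--
-- SEED_WORD_LENGTH = 6
--
-- def letter_frequency(word: str) -> dict[str, int]:
--     freq: dict[str, int] = {}
--     for c in word:
--         freq[c] = freq.get(c, 0) + 1
--     return freq
--
-- def can_form(candidate: str, seed_freq: dict[str, int]) -> bool: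
--     """Returns True if candidate can be constructed from the seed's letters."""
--     available = dict(seed_freq)
--     for c in candidate:
--         if available.get(c, 0) == 0:
--             return False
--         available[c] -= 1
--     return True
--
-- def compute_max_score(seed_word: str, word_set: set[str]) -> int:
--     """Sum of scores for every valid sub-word constructable from seed_word."""
--     seed_freq = letter_frequency(seed_word)
--     total = 0
--     for word in word_set:
--         length = len(word)
--         if MIN_WORD_LENGTH <= length <= SEED_WORD_LENGTH:
--             if can_form(word, seed_freq):
--                 total += WORD_SCORES.get(length, 0)
--     return total
-- ===== SOURCE B (Python) =====
-- SCORE_BY_LENGTH = [0, 0, 100, 300, 600, 1000, 1500]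
--
-- def compute_max_score(seed_word, word_set):
--     """Sum of scores for every valid sub-word constructable from seed_word.
--
--     Sorts the seed's letters once, keeping at most 6 copies of each letter
--     (scored words have at most 6 letters, so extra copies can never matter);
--     a word is then formable iff its sorted letters are a subsequence of that
--     capped sorted seed (greedy two-pointer scan), so no per-word frequency
--     dicts are built.
--     """
--     kept = []
--     run = 0
--     prev = None
--     for c in sorted(seed_word):
--         run = run + 1 if c == prev else 1
--         prev = c
--         if run <= 6:
--             kept.append(c)
--     total = 0
--     for word in word_set:
--         n = len(word)
--         if 2 <= n <= 6:
--             ws = sorted(word)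
--             i = 0
--             for c in kept:
--                 if i < n and ws[i] == c:
--                     i += 1
--             if i == n:
--                 total += SCORE_BY_LENGTH[n]
--     return total
-- ===== Notes on version B (the rewrite author's own statement) =====
-- stated objective: alternative
-- what changed: Replaces A's per-word frequency-dict copy-and-decrement feasibility check with sorting the seed's letters once (capped at 6 copies per letter, the maximum scored word length) and testing each word by a greedy two-pointer subsequence scan of its sorted letters, and replaces the score dict with a length-indexed list.
import Mathlib
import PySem

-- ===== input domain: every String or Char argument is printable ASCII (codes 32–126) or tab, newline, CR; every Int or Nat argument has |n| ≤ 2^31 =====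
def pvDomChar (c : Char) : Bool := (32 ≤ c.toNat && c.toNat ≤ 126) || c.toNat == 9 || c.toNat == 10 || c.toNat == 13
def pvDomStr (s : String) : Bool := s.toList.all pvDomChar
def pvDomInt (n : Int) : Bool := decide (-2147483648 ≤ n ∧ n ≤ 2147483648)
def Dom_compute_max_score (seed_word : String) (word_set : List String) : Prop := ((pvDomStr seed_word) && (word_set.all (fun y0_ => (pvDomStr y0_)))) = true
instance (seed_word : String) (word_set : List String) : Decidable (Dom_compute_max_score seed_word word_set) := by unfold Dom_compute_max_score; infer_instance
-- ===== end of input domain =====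

-- B replaces A's per-word frequency-dict consumption check with sorting the seed's
-- letters once (capped at 6 copies per letter, the maximum scored word length) and a
-- greedy subsequence scan per word (objective: alternative, no speed claim).

-- ===== PORT A =====
def WORD_SCORES : PySem.Dict Int Int :=
  PySem.Dict.ofList [(2, 100), (3, 300), (4, 600), (5, 1000), (6, 1500)]

def MIN_WORD_LENGTH : Int := 2
def SEED_WORD_LENGTH : Int := 6

def letter_frequency (word : List Char) : PySem.Dict Char Int :=
  word.foldl (fun freq c => freq.insert c (freq.getD c 0 + 1)) PySem.Dict.empty

def can_form : List Char → PySem.Dict Char Int → Bool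
  | [], _ => true
  | c :: rest, available =>
    if available.getD c 0 == 0 then false
    else can_form rest (available.insert c (available.getD c 0 - 1))

def compute_max_score (seed_word : String) (word_set : List String) : Int :=
  let seed_freq := letter_frequency seed_word.toList
  word_set.foldl
    (fun total word =>
      let length : Int := (word.toList.length : Int)
      if MIN_WORD_LENGTH ≤ length ∧ length ≤ SEED_WORD_LENGTH then
        if can_form word.toList seed_freq then total + WORD_SCORES.getD length 0
        else total
      else total)
    0

-- ===== PORT B =====
def SCORE_BY_LENGTH : List Int := [0, 0, 100, 300, 600, 1000, 1500]

-- state: (kept, run, prev) of B's capping loop over the sorted seed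
def capStep (s : List Char × Nat × Option Char) (c : Char) : List Char × Nat × Option Char :=
  let run := if s.2.2 = some c then s.2.1 + 1 else 1
  (if run ≤ 6 then s.1 ++ [c] else s.1, run, some c)

def compute_max_score_alt (seed_word : String) (word_set : List String) : Int :=
  let kept := ((PySem.List.sorted seed_word.toList (fun c => c) false).foldl
    capStep ([], 0, none)).1
  word_set.foldl
    (fun total word =>
      let n := word.toList.length
      if 2 ≤ n ∧ n ≤ 6 then
        let ws := PySem.List.sorted word.toList (fun c => c) false
        let i := kept.foldl
          (fun i c => if i < n && (ws.getD i ' ' == c) then i + 1 else i) 0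
        if i == n then total + SCORE_BY_LENGTH.getD n 0 else total
      else total)
    0

-- ===== PRECONDITION & SPEC =====
def Spec_compute_max_score (seed_word : String) (word_set : List String) (out : Int) : Prop := out = compute_max_score_alt seed_word word_set
instance (seed_word : String) (word_set : List String) (out : Int) : Decidable (Spec_compute_max_score seed_word word_set out) := by unfold Spec_compute_max_score; infer_instance

-- ===== CLAIM (what is proved, stated in full; the proofs are below) =====
def Claim_equal_compute_max_score : Prop := ∀ (seed_word : String) (word_set : List String), Dom_compute_max_score seed_word word_set → Spec_compute_max_score seed_word word_set (compute_max_score seed_word word_set)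

-- ===== LEMMAS AND PROOFS =====

theorem canform_iff (cs : List Char) (avail : PySem.Dict Char Int)
    (hnn : ∀ c, 0 ≤ avail.getD c 0) :
    can_form cs avail = true ↔ ∀ c, (cs.count c : Int) ≤ avail.getD c 0 := by
  induction cs generalizing avail with
  | nil => simp [can_form]; intro c; simpa using hnn c
  | cons c cs ih =>
    simp only [can_form, beq_iff_eq]
    by_cases h0 : avail.getD c 0 = 0
    · rw [if_pos h0]
      constructor
      · intro h; cases h
      · intro h
        have := h c
        rw [List.count_cons_self, h0] at this
        push_cast at this
        omega
    · rw [if_neg h0]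
      have hpos : 1 ≤ avail.getD c 0 := by have := hnn c; omega
      have hnn' : ∀ d, 0 ≤ (avail.insert c (avail.getD c 0 - 1)).getD d 0 := by
        intro d
        rw [PySem.Dict.getD_insert]
        by_cases hd : d = c
        · simp [hd]; omega
        · simp [hd]; exact hnn d
      rw [ih _ hnn']
      constructor
      · intro h d
        have hd := h d
        rw [PySem.Dict.getD_insert] at hd
        by_cases hdc : d = c
        · subst hdc
          rw [List.count_cons_self]
          simp only at hd
          push_cast at hd ⊢
          omega
        · rw [List.count_cons_of_ne (Ne.symm hdc)]
          simp only [if_neg hdc] at hd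
          exact hd
      · intro h d
        have hd := h d
        rw [PySem.Dict.getD_insert]
        by_cases hdc : d = c
        · subst hdc
          rw [List.count_cons_self] at hd
          rw [if_pos rfl]
          push_cast at hd ⊢
          omega
        · simp only [if_neg hdc]
          rw [List.count_cons_of_ne (Ne.symm hdc)] at hd
          exact hd

theorem letter_frequency_getD (seed : List Char) (c : Char) :
    (letter_frequency seed).getD c 0 = (seed.count c : Int) := by
  unfold letter_frequency
  rw [PySem.Dict.getD_foldl_insert_add_one]
  simp

theorem canform_freq_iff (word seed : List Char) :
    can_form word (letter_frequency seed) = true ↔ List.Subperm word seed := by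
  rw [canform_iff]
  · rw [List.subperm_ext_iff]
    constructor
    · intro h x _
      have := h x
      rw [letter_frequency_getD] at this
      exact_mod_cast this
    · intro h c
      rw [letter_frequency_getD]
      by_cases hc : c ∈ word
      · exact_mod_cast h c hc
      · simp [List.count_eq_zero_of_not_mem hc]
  · intro c; rw [letter_frequency_getD]; positivity

-- the greedy step of B's inner loop
def gstep (ws : List Char) (i : Nat) (c : Char) : Nat :=
  if i < ws.length && (ws.getD i ' ' == c) then i + 1 else i

theorem gfold_const (ws seedl : List Char) (i : Nat) (h : ws.length ≤ i) :
    seedl.foldl (gstep ws) i = i := by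
  induction seedl with
  | nil => rfl
  | cons s seedl ih =>
    have hs : gstep ws i s = i := by
      unfold gstep
      simp [Nat.not_lt.mpr h]
    rw [List.foldl_cons, hs, ih]

theorem gfold_spec (ws seedl : List Char) (i : Nat) (hi : i ≤ ws.length) :
    (seedl.foldl (gstep ws) i = ws.length ↔ List.Sublist (ws.drop i) seedl) := by
  induction seedl generalizing i with
  | nil =>
    simp only [List.foldl_nil, List.sublist_nil, List.drop_eq_nil_iff]
    omega
  | cons s seedl ih =>
    rw [List.foldl_cons]
    by_cases hlt : i < ws.length
    · have hdrop : ws.drop i = ws[i] :: ws.drop (i + 1) := List.drop_eq_getElem_cons hlt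
      by_cases hc : ws[i] = s
      · have hstep : gstep ws i s = i + 1 := by
          unfold gstep; simp [hlt, hc]
        rw [hstep, ih _ (by omega), hdrop, hc]
        exact (List.cons_sublist_cons).symm
      · have hstep : gstep ws i s = i := by
          unfold gstep
          simp only [List.getD_eq_getElem _ _ hlt]
          simp [hc]
        rw [hstep, ih _ hi, hdrop]
        constructor
        · intro h; exact h.cons s
        · intro h
          rcases List.cons_sublist_cons'.mp h with h' | ⟨he, _⟩
          · exact h'
          · exact absurd he hc
    · have hieq : i = ws.length := by omega
      have hstep : gstep ws i s = i := by
        unfold gstep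
        simp [Nat.not_lt.mpr (by omega : ws.length ≤ i)]
      rw [hstep, gfold_const ws seedl i (by omega), hieq]
      simp

def CapInv (p : List Char) (s : List Char × Nat × Option Char) : Prop :=
  (∀ c : Char, s.1.count c = min (p.count c) 6) ∧
  s.1.Pairwise (· ≤ ·) ∧
  (∀ x ∈ s.1, x ∈ p) ∧
  (∀ a : Char, s.2.2 = some a → a ∈ p ∧ (∀ x ∈ p, x ≤ a) ∧ s.2.1 = p.count a) ∧
  (s.2.2 = none → p = [])

theorem count_single (d c : Char) : List.count d [c] = if d = c then 1 else 0 := by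
  by_cases h : d = c
  · subst h; simp
  · rw [if_neg h]
    exact List.count_eq_zero.mpr (by simp [h])

theorem capInv_step (p : List Char) (s : List Char × Nat × Option Char) (c : Char)
    (hpc : ∀ x ∈ p, x ≤ c) (hinv : CapInv p s) : CapInv (p ++ [c]) (capStep s c) := by
  obtain ⟨out, run, prev⟩ := s
  obtain ⟨hcnt, hpw, hmem, hsome, hnone⟩ := hinv
  simp only at hcnt hpw hmem hsome hnone
  cases prev with
  | none =>
    have hpnil : p = [] := hnone rfl
    have hs1 : out = [] := by
      apply List.eq_nil_iff_forall_not_mem.mpr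
      intro x hx
      exact absurd (hmem x hx) (by simp [hpnil])
    subst hpnil hs1
    have hcs : capStep (([] : List Char), run, (none : Option Char)) c
        = ([c], 1, some c) := by simp [capStep]
    rw [hcs]
    refine ⟨?_, ?_, ?_, ?_, ?_⟩
    · intro d
      simp only [List.nil_append]
      rw [count_single]
      by_cases hdc : d = c <;> simp [hdc]
    · simp
    · simp
    · intro a ha
      simp only at ha
      simp at ha
      subst ha
      refine ⟨by simp, by intro x hx; simp at hx; simp [hx], ?_⟩
      simp only [List.nil_append]
      rw [count_single, if_pos rfl]
    · intro h; simp at h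
  | some a =>
    obtain ⟨hain, hbound, hrun⟩ := hsome a rfl
    by_cases hac : a = c
    · subst hac
      have hcs : capStep (out, run, some a) a
          = (if run + 1 ≤ 6 then out ++ [a] else out, run + 1, some a) := by
        simp [capStep]
      rw [hcs]
      refine ⟨?_, ?_, ?_, ?_, ?_⟩
      · intro d
        have h1 := hcnt d
        rw [List.count_append, count_single]
        by_cases h6 : run + 1 ≤ 6
        · rw [if_pos h6, List.count_append, count_single]
          by_cases hda : d = a
          · rw [if_pos hda]
            have h2 : List.count d p = List.count a p := by rw [hda]
            have h3 : List.count d out = List.count a out := by rw [hda]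
            omega
          · rw [if_neg hda]
            omega
        · rw [if_neg h6]
          dsimp only
          by_cases hda : d = a
          · rw [if_pos hda]
            have h2 : List.count d p = List.count a p := by rw [hda]
            omega
          · rw [if_neg hda]
            omega
      · by_cases h6 : run + 1 ≤ 6
        · rw [if_pos h6, List.pairwise_append]
          refine ⟨hpw, by simp, ?_⟩
          intro x hx y hy
          simp at hy; subst hy
          exact hpc x (hmem x hx)
        · rw [if_neg h6]; exact hpw
      · intro x hx
        by_cases h6 : run + 1 ≤ 6
        · rw [if_pos h6] at hx
          rcases List.mem_append.mp hx with hx | hx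
          · exact List.mem_append_left _ (hmem x hx)
          · simp at hx; subst hx; simp
        · rw [if_neg h6] at hx
          exact List.mem_append_left _ (hmem x hx)
      · intro b hb
        simp only at hb
        simp at hb
        subst hb
        refine ⟨by simp, ?_, ?_⟩
        · intro x hx
          rcases List.mem_append.mp hx with hx | hx
          · exact hpc x hx
          · simp at hx; simp [hx]
        · dsimp only
          rw [List.count_append, count_single, if_pos rfl]
          omega
      · intro h; simp at h
    · have hcp : c ∉ p := by
        intro hcmem
        exact hac (le_antisymm (hpc a hain) (hbound c hcmem))
      have hc0 : List.count c p = 0 := List.count_eq_zero.mpr hcp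
      have hcs : capStep (out, run, some a) c = (out ++ [c], 1, some c) := by
        simp [capStep, hac]
      rw [hcs]
      refine ⟨?_, ?_, ?_, ?_, ?_⟩
      · intro d
        have h1 := hcnt d
        rw [List.count_append, count_single, List.count_append, count_single]
        by_cases hdc : d = c
        · rw [if_pos hdc]
          have h2 : List.count d p = List.count c p := by rw [hdc]
          have h3 : List.count d out = List.count c out := by rw [hdc]
          omega
        · rw [if_neg hdc]
          omega
      · rw [List.pairwise_append]
        refine ⟨hpw, by simp, ?_⟩
        intro x hx y hy
        simp at hy; subst hy
        exact hpc x (hmem x hx)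
      · intro x hx
        rcases List.mem_append.mp hx with hx | hx
        · exact List.mem_append_left _ (hmem x hx)
        · simp at hx; subst hx; simp
      · intro b hb
        simp only at hb
        simp at hb
        subst hb
        refine ⟨by simp, ?_, ?_⟩
        · intro x hx
          rcases List.mem_append.mp hx with hx | hx
          · exact hpc x hx
          · simp at hx; simp [hx]
        · rw [List.count_append, count_single, if_pos rfl, hc0]
      · intro h; simp at h

theorem cap_fold (xs : List Char) (p : List Char) (s : List Char × Nat × Option Char)
    (hsort : (p ++ xs).Pairwise (· ≤ ·)) (hinv : CapInv p s) :
    CapInv (p ++ xs) (xs.foldl capStep s) := by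
  induction xs generalizing p s with
  | nil => simpa using hinv
  | cons c xs ih =>
    have hpc : ∀ x ∈ p, x ≤ c := by
      rw [List.pairwise_append] at hsort
      intro x hx
      exact hsort.2.2 x hx c (by simp)
    have hsort' : ((p ++ [c]) ++ xs).Pairwise (· ≤ ·) := by
      simpa [List.append_assoc] using hsort
    have h := ih (p ++ [c]) (capStep s c) hsort' (capInv_step p s c hpc hinv)
    rw [List.foldl_cons]
    simpa [List.append_assoc] using h

theorem capped_props (ss : List Char) (hs : ss.Pairwise (· ≤ ·)) :
    (∀ c, ((ss.foldl capStep ([], 0, none)).1).count c = min (ss.count c) 6) ∧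
    ((ss.foldl capStep ([], 0, none)).1).Pairwise (· ≤ ·) := by
  have hinit : CapInv [] ([], 0, none) := by
    refine ⟨?_, ?_, ?_, ?_, ?_⟩
    · intro c; simp
    · simp
    · simp
    · intro a ha; simp at ha
    · intro _; rfl
  have h := cap_fold ss [] ([], 0, none) (by simpa using hs) hinit
  obtain ⟨h1, h2, _⟩ := h
  exact ⟨by simpa using h1, h2⟩

theorem greedy_iff_subperm (word seed : List Char) (hle : word.length ≤ 6) :
    (((PySem.List.sorted seed (fun c => c) false).foldl capStep ([], 0, none)).1).foldl
      (gstep (PySem.List.sorted word (fun c => c) false)) 0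
      = word.length ↔ List.Subperm word seed := by
  set ws := PySem.List.sorted word (fun c => c) false with hws
  set ss := PySem.List.sorted seed (fun c => c) false with hss
  have hwperm : ws.Perm word := PySem.List.sorted_perm word (fun c => c) false
  have hsperm : ss.Perm seed := PySem.List.sorted_perm seed (fun c => c) false
  have hsp : ss.Pairwise (· ≤ ·) := PySem.List.sorted_pairwise seed (fun c => c)
  obtain ⟨hc, hkpw⟩ := capped_props ss hsp
  have hlen : ws.length = word.length := hwperm.length_eq
  rw [← hlen, gfold_spec _ _ 0 (by omega), List.drop_zero]
  constructor
  · intro h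
    rw [List.subperm_ext_iff]
    intro x _
    have h1 : ws.count x ≤ ((ss.foldl capStep ([], 0, none)).1).count x := h.count_le x
    have h2 := hc x
    have hcs : ss.count x = seed.count x := hsperm.count_eq x
    have hcw : ws.count x = word.count x := hwperm.count_eq x
    omega
  · intro h
    have hwpw : ws.Pairwise (· ≤ ·) := PySem.List.sorted_pairwise word (fun c => c)
    apply List.sublist_of_subperm_of_pairwise _ hwpw hkpw
    rw [List.subperm_ext_iff]
    intro x hx
    have hxw : word.count x ≤ seed.count x :=
      (List.subperm_ext_iff.mp h) x ((hwperm.mem_iff).mp hx)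
    have hcw : ws.count x = word.count x := hwperm.count_eq x
    have hcs : ss.count x = seed.count x := hsperm.count_eq x
    have hb : ws.count x ≤ ws.length := List.count_le_length
    have h2 := hc x
    omega

theorem foldl_ext {α β : Type} (f g : β → α → β) (h : ∀ t w, f t w = g t w)
    (l : List α) (a : β) : l.foldl f a = l.foldl g a := by
  induction l generalizing a with
  | nil => rfl
  | cons x l ih => rw [List.foldl_cons, List.foldl_cons, h, ih]

theorem score_eq (n : Nat) (h2 : 2 ≤ n) (h6 : n ≤ 6) :
    WORD_SCORES.getD (n : Int) 0 = SCORE_BY_LENGTH.getD n 0 := by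
  interval_cases n <;> decide

-- ===== VERDICT (by name: the statement is the Claim_ definition above) =====
theorem compute_max_score_spec : Claim_equal_compute_max_score := by
  intro seed_word word_set _
  unfold Spec_compute_max_score
  dsimp only [compute_max_score, compute_max_score_alt]
  apply foldl_ext
  intro total word
  dsimp only
  simp only [MIN_WORD_LENGTH, SEED_WORD_LENGTH]
  have hlen : (2 ≤ (word.toList.length : Int) ∧ (word.toList.length : Int) ≤ 6)
      ↔ (2 ≤ word.toList.length ∧ word.toList.length ≤ 6) := by
    constructor <;> intro ⟨a, b⟩ <;> constructor <;> omega
  by_cases hn : 2 ≤ word.toList.length ∧ word.toList.length ≤ 6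
  · rw [if_pos (hlen.mpr hn), if_pos hn]
    have hlen2 : (PySem.List.sorted word.toList (fun c => c) false).length = word.toList.length :=
      (PySem.List.sorted_perm word.toList (fun c => c) false).length_eq
    have hstepeq : (fun (i : Nat) (c : Char) =>
        if i < word.toList.length
            && ((PySem.List.sorted word.toList (fun c => c) false).getD i ' ' == c)
        then i + 1 else i)
        = gstep (PySem.List.sorted word.toList (fun c => c) false) := by
      funext i c; unfold gstep; rw [hlen2]
    rw [hstepeq]
    have hg := greedy_iff_subperm word.toList seed_word.toList hn.2
    have hcf := canform_freq_iff word.toList seed_word.toList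
    by_cases hform : List.Subperm word.toList seed_word.toList
    · rw [if_pos (hcf.mpr hform)]
      have hb : ((((PySem.List.sorted seed_word.toList (fun c => c) false).foldl
          capStep ([], 0, none)).1).foldl
          (gstep (PySem.List.sorted word.toList (fun c => c) false)) 0
          == word.toList.length) = true := by
        simp only [beq_iff_eq]; exact hg.mpr hform
      rw [if_pos hb, score_eq _ hn.1 hn.2]
    · have h1 : can_form word.toList (letter_frequency seed_word.toList) = false := by
        cases h : can_form word.toList (letter_frequency seed_word.toList)
        · rfl
        · exact absurd (hcf.mp h) hform
      have h2 : ((((PySem.List.sorted seed_word.toList (fun c => c) false).foldl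
          capStep ([], 0, none)).1).foldl
          (gstep (PySem.List.sorted word.toList (fun c => c) false)) 0
          == word.toList.length) = false := by
        simp only [beq_eq_false_iff_ne, ne_eq]
        intro h; exact hform (hg.mp h)
      rw [h1, h2]
      simp
  · rw [if_neg (fun h => hn (hlen.mp h)), if_neg hn]
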